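-- pv_equiv track=rewrite | github.com/morzan1001/Dependency-Control | backend/app/services/reachability_enrichment.py | _match_symbols
-- ===== SOURCE A (Python) =====
-- from typing import Any, Dict, List, Optional, TypedDict
--
-- def _match_symbols(vulnerable_symbols: List[str], used_symbols: List[str]) -> List[str]:
--     """
--     Match vulnerable symbols against used symbols.
--     Returns list of matched symbols.
--     """
--     if not vulnerable_symbols or not used_symbols:
--         return []
--
--     matched = []
--     vuln_lower = {s.lower() for s in vulnerable_symbols}
--
--     for used in used_symbols:
--         used_lower = used.lower()
--
--         # Direct match
--         if used_lower in vuln_lower: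
--             matched.append(used)
--             continue
--
--         # Check if used symbol contains vulnerable symbol (method chaining)
--         # e.g., "_.template" contains "template"
--         for vuln in vulnerable_symbols:
--             vuln_l = vuln.lower()
--             if vuln_l in used_lower or used_lower.endswith("." + vuln_l):
--                 matched.append(used)
--                 break
--
--     return matched
-- ===== SOURCE B (Python) =====
-- from typing import List
--
-- def _match_symbols(vulnerable_symbols: List[str], used_symbols: List[str]) -> List[str]:
--     # Swap the loop nesting: one marking pass per vulnerable symbol over the
--     # pre-lowercased used symbols, then emit the marked used symbols in order.
--     # (The set pre-check and the endswith("." + v) test in A are both subsumed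
--     #  by the plain substring test, so a single test per pair suffices.)
--     used_lower = [u.lower() for u in used_symbols]
--     hit = [False] * len(used_symbols)
--     for v in vulnerable_symbols:
--         vl = v.lower()
--         hit = [h or (vl in ul) for h, ul in zip(hit, used_lower)]
--     return [u for u, h in zip(used_symbols, hit) if h]
-- ===== Notes on version B (the rewrite author's own statement) =====
-- stated objective: alternative
-- what changed: B swaps the loop nesting (one marking pass per vulnerable symbol over pre-lowercased used symbols, then emits marked symbols in input order) and drops A's redundant set pre-check and endswith('.'+v) test, both of which are subsumed by the plain substring test.
import Mathlib
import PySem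

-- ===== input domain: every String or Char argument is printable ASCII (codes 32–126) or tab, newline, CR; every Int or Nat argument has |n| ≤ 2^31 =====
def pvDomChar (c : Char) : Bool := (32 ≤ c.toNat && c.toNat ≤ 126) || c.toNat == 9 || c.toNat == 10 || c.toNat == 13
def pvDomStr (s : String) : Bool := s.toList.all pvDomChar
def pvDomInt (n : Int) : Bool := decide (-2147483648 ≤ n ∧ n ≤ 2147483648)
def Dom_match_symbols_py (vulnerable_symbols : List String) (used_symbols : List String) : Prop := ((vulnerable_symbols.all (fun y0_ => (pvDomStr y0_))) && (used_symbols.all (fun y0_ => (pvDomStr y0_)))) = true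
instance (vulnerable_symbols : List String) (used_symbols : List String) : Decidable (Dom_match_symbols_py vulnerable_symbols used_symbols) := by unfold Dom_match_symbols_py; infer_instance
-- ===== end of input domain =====

-- B swaps the loop nesting (one marking pass per vulnerable symbol over pre-lowercased
-- used symbols, then emits the marked ones) and drops A's redundant set pre-check and
-- endswith test, both subsumed by the substring test; objective: simpler (same cost).

-- ===== PORT A =====
def match_symbols_py (vulnerable_symbols : List String) (used_symbols : List String) : List String :=
  if vulnerable_symbols = [] ∨ used_symbols = [] then []
  else
    let vuln_lower := PySem.Set.ofList (vulnerable_symbols.map PySem.Str.lower)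
    used_symbols.foldl (fun matched used =>
      let used_lower := PySem.Str.lower used
      -- direct match
      if PySem.Set.contains vuln_lower used_lower then matched ++ [used]
      -- inner for-loop with break: appends `used` once iff some vuln satisfies the test
      else if vulnerable_symbols.any (fun vuln =>
          let vuln_l := PySem.Str.lower vuln
          PySem.Str.isIn vuln_l used_lower ||
            PySem.Str.endswith used_lower ("." ++ vuln_l)) then matched ++ [used]
      else matched) []

-- ===== PORT B =====
def match_symbols_py_alt (vulnerable_symbols : List String) (used_symbols : List String) : List String :=
  let used_lower := used_symbols.map PySem.Str.lower
  let hit := vulnerable_symbols.foldl (fun hit v =>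
      let vl := PySem.Str.lower v
      List.zipWith (fun h ul => h || PySem.Str.isIn vl ul) hit used_lower)
    (List.replicate used_symbols.length false)
  ((used_symbols.zip hit).filter (fun p => p.2)).map (fun p => p.1)

-- ===== PRECONDITION & SPEC =====
def Spec_match_symbols_py (vulnerable_symbols : List String) (used_symbols : List String) (out : List String) : Prop := out = match_symbols_py_alt vulnerable_symbols used_symbols
instance (vulnerable_symbols : List String) (used_symbols : List String) (out : List String) : Decidable (Spec_match_symbols_py vulnerable_symbols used_symbols out) := by unfold Spec_match_symbols_py; infer_instance

-- ===== CLAIM (what is proved, stated in full; the proofs are below) =====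
def Claim_equal_match_symbols_py : Prop := ∀ (vulnerable_symbols : List String) (used_symbols : List String), Dom_match_symbols_py vulnerable_symbols used_symbols → Spec_match_symbols_py vulnerable_symbols used_symbols (match_symbols_py vulnerable_symbols used_symbols)

-- ===== LEMMAS AND PROOFS =====

-- the common match predicate both programs compute
def pvQ (vs : List String) (u : String) : Bool :=
  vs.any (fun v => PySem.Str.isIn (PySem.Str.lower v) (PySem.Str.lower u))

lemma zipWith_or_map (us : List String) (f : String → Bool) (vl : String) :
    List.zipWith (fun h ul => h || PySem.Str.isIn vl ul) (us.map f) (us.map PySem.Str.lower)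
      = us.map (fun u => f u || PySem.Str.isIn vl (PySem.Str.lower u)) := by
  induction us with
  | nil => rfl
  | cons u us ih => simp


lemma fold_hit (vs : List String) (us : List String) (f : String → Bool) :
    vs.foldl (fun hit v =>
        List.zipWith (fun h ul => h || PySem.Str.isIn (PySem.Str.lower v) ul) hit
          (us.map PySem.Str.lower)) (us.map f)
      = us.map (fun u => f u || pvQ vs u) := by
  induction vs generalizing f with
  | nil => simp [pvQ]
  | cons v vs ih =>
    simp only [List.foldl_cons, zipWith_or_map]
    rw [ih]
    simp [pvQ, Bool.or_assoc]

lemma zip_filter_map (us : List String) (p : String → Bool) :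
    (((us.zip (us.map p)).filter (fun q => q.2)).map (fun q => q.1)) = us.filter p := by
  induction us with
  | nil => rfl
  | cons u us ih =>
    by_cases h : p u <;> simp [h, ih]

lemma alt_eq_filter (vs us : List String) :
    match_symbols_py_alt vs us = us.filter (pvQ vs) := by
  unfold match_symbols_py_alt
  have h0 : List.replicate us.length false = us.map (fun _ => false) := by simp
  simp only [h0, fold_hit, Bool.false_or, zip_filter_map]

lemma endswith_isIn (v u : String) :
    PySem.Str.endswith (PySem.Str.lower u) ("." ++ PySem.Str.lower v) = true →
    PySem.Str.isIn (PySem.Str.lower v) (PySem.Str.lower u) = true := by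
  intro h
  rw [PySem.Str.isIn_iff_infix]
  rw [PySem.Str.endswith_eq, PySem.Chars.endswith_iff] at h
  refine List.IsSuffix.isInfix (List.IsSuffix.trans ?_ h)
  rw [String.toList_append]
  exact List.suffix_cons _ _

lemma pred_eq (vs : List String) (u : String) :
    (if PySem.Set.contains (PySem.Set.ofList (vs.map PySem.Str.lower)) (PySem.Str.lower u)
      then true
      else vs.any (fun vuln =>
        PySem.Str.isIn (PySem.Str.lower vuln) (PySem.Str.lower u) ||
          PySem.Str.endswith (PySem.Str.lower u) ("." ++ PySem.Str.lower vuln)))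
    = pvQ vs u := by
  cases hq : pvQ vs u with
  | false =>
    have hq' := hq
    rw [pvQ, List.any_eq_false] at hq'
    have hc : ¬ ((PySem.Set.ofList (vs.map PySem.Str.lower)).contains (PySem.Str.lower u) = true) := by
      intro hc
      rw [PySem.Set.contains_iff, PySem.Set.mem_ofList, List.mem_map] at hc
      obtain ⟨v, hv, hveq⟩ := hc
      exact hq' v hv (by rw [hveq, PySem.Str.isIn_iff_infix])
    rw [if_neg hc, List.any_eq_false]
    intro v hv
    simp only [Bool.or_eq_true, not_or]
    exact ⟨hq' v hv, fun h => hq' v hv (endswith_isIn v u h)⟩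
  | true =>
    obtain ⟨v, hv, hin⟩ := List.any_eq_true.mp hq
    split
    · rfl
    · exact List.any_eq_true.mpr ⟨v, hv, by simp only [Bool.or_eq_true]; exact Or.inl hin⟩

lemma a_eq_filter (vs us : List String) :
    match_symbols_py vs us = us.filter (pvQ vs) := by
  unfold match_symbols_py
  split
  · rename_i h
    rcases h with h | h
    · subst h; simp [pvQ]
    · subst h; rfl
  · show us.foldl (fun matched used =>
        if PySem.Set.contains (PySem.Set.ofList (vs.map PySem.Str.lower)) (PySem.Str.lower used)
          then matched ++ [used]
        else if vs.any (fun vuln =>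
            PySem.Str.isIn (PySem.Str.lower vuln) (PySem.Str.lower used) ||
              PySem.Str.endswith (PySem.Str.lower used) ("." ++ PySem.Str.lower vuln))
          then matched ++ [used]
        else matched) [] = us.filter (pvQ vs)
    have hstep : (fun (matched : List String) (used : String) =>
        if PySem.Set.contains (PySem.Set.ofList (vs.map PySem.Str.lower)) (PySem.Str.lower used)
          then matched ++ [used]
        else if vs.any (fun vuln =>
            PySem.Str.isIn (PySem.Str.lower vuln) (PySem.Str.lower used) ||
              PySem.Str.endswith (PySem.Str.lower used) ("." ++ PySem.Str.lower vuln))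
          then matched ++ [used]
        else matched)
        = fun matched used => if pvQ vs used then matched ++ [used] else matched := by
      funext matched used
      rw [← pred_eq vs used]
      split_ifs <;> simp_all
    rw [hstep, PySem.List.foldl_append_if]
    simp

-- ===== VERDICT (by name: the statement is the Claim_ definition above) =====
theorem match_symbols_py_spec : Claim_equal_match_symbols_py := by
  intro vs us _
  unfold Spec_match_symbols_py
  rw [a_eq_filter, alt_eq_filter]
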